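-- pv_equiv track=rewrite | github.com/framirezseidor/LAMOSALAKE | SCRIPTS_USUARIO/FERNANDO/Python/MATRIZ_APIC.PY | pick_tipo_dato
-- ===== SOURCE A (Python) =====
-- from collections import defaultdict, Counter
--
-- def pick_tipo_dato(tipos: list[str]) -> str:
--     """Elige el tipo de dato más frecuente; si empate, concatena únicos alfabéticos."""
--     tipos = [t for t in tipos if t]  # quita vacíos
--     if not tipos:
--         return ""
--     cnt = Counter(tipos)
--     maxc = max(cnt.values())
--     candidatos = sorted([t for t, c in cnt.items() if c == maxc])
--     if len(candidatos) == 1: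
--         return candidatos[0]
--     return " | ".join(candidatos)
-- ===== SOURCE B (Python) =====
-- def pick_tipo_dato(tipos: list[str]) -> str:
--     """Sort-then-scan: group equal adjacent values of the sorted list into runs,
--     keep the keys whose run length is maximal (already alphabetical), join."""
--     vals = sorted(t for t in tipos if t)
--     if not vals:
--         return ""
--     runs = []
--     i = 0
--     while i < len(vals):
--         j = i
--         while j < len(vals) and vals[j] == vals[i]:
--             j += 1
--         runs.append((vals[i], j - i))
--         i = j
--     maxc = max(n for _, n in runs)
--     cands = [k for k, n in runs if n == maxc]
--     if len(cands) == 1: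
--         return cands[0]
--     return " | ".join(cands)
-- ===== Notes on version B (the rewrite author's own statement) =====
-- stated objective: alternative
-- what changed: Replaces Counter hash-counting plus max-over-values plus a final sort of the tied keys by a single sort of the filtered values followed by an adjacent-runs scan: run lengths are the counts and the tied keys emerge already in alphabetical order.
import Mathlib
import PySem

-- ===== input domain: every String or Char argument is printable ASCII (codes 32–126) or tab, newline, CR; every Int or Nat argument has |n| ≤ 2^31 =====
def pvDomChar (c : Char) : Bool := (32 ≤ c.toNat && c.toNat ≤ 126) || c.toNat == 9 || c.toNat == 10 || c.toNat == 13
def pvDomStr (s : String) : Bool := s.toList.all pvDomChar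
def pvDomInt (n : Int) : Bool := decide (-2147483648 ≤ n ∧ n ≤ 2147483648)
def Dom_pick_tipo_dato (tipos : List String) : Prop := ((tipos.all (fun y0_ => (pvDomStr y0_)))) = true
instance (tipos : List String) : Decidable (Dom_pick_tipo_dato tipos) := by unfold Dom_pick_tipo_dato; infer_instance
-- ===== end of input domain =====

-- B replaces Counter hash-counting + max-over-values + final sort of tied keys by one sort of the
-- filtered values followed by an adjacent-runs scan (alternative algorithm, same result).


-- ===== PORT A =====
def pick_tipo_dato (tipos : List String) : String :=
  let tipos2 := tipos.filter (fun t => t != "")   -- [t for t in tipos if t]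
  if tipos2 = [] then ""
  else
    let cnt := PySem.Dict.counter tipos2
    -- cnt.values is nonempty here (tipos2 ≠ []), so max? = some; the .getD default is never used
    let maxc := (PySem.List.max? cnt.values (fun v => v)).getD 0
    let candidatos := PySem.List.sorted ((cnt.items.filter (fun p => p.2 == maxc)).map (fun p => p.1)) (fun t => t)
    if candidatos.length = 1 then candidatos.headD ""   -- candidatos[0]; nonempty here
    else PySem.Str.join " | " candidatos

-- ===== PORT B =====
-- the inner while-pair of Source B: split the sorted list into (value, run-length) pairs
def pvRuns (vals : List String) : List (String × Int) :=
  match vals with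
  | [] => []
  | x :: xs =>
      (x, ((xs.takeWhile (fun y => y == x)).length : Int) + 1) ::
        pvRuns (xs.dropWhile (fun y => y == x))
termination_by vals.length
decreasing_by simpa using Nat.lt_succ_of_le (List.length_dropWhile_le _ _)

def pick_tipo_dato_alt (tipos : List String) : String :=
  let vals := PySem.List.sorted (tipos.filter (fun t => t != "")) (fun t => t)
  if vals = [] then ""
  else
    let rs := pvRuns vals
    -- rs is nonempty here (vals ≠ []), so max? = some; the .getD default is never used
    let maxc := (PySem.List.max? (rs.map (fun p => p.2)) (fun v => v)).getD 0
    let cands := (rs.filter (fun p => p.2 == maxc)).map (fun p => p.1)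
    if cands.length = 1 then cands.headD ""   -- cands[0]; nonempty here
    else PySem.Str.join " | " cands

-- ===== PRECONDITION & SPEC =====
def Spec_pick_tipo_dato (tipos : List String) (out : String) : Prop := out = pick_tipo_dato_alt tipos
instance (tipos : List String) (out : String) : Decidable (Spec_pick_tipo_dato tipos out) := by unfold Spec_pick_tipo_dato; infer_instance

-- ===== CLAIM (what is proved, stated in full; the proofs are below) =====
def Claim_equal_pick_tipo_dato : Prop := ∀ (tipos : List String), Dom_pick_tipo_dato tipos → Spec_pick_tipo_dato tipos (pick_tipo_dato tipos)

-- ===== LEMMAS AND PROOFS =====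

-- the distinct keys of pvRuns, in order
def pvKeys (vals : List String) : List String :=
  match vals with
  | [] => []
  | x :: xs => x :: pvKeys (xs.dropWhile (fun y => y == x))
termination_by vals.length
decreasing_by simpa using Nat.lt_succ_of_le (List.length_dropWhile_le _ _)

lemma mem_of_mem_pvKeys {k : String} : ∀ {vals : List String}, k ∈ pvKeys vals → k ∈ vals := by
  intro vals
  induction vals using pvKeys.induct with
  | case1 => simp [pvKeys]
  | case2 x xs ih =>
    intro h
    rw [pvKeys] at h
    rcases List.mem_cons.mp h with rfl | h
    · exact List.mem_cons_self ..
    · exact List.mem_cons_of_mem _ ((List.dropWhile_sublist _).mem (ih h))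

lemma lt_of_mem_dropWhile {x y : String} {xs : List String}
    (h : (x :: xs).Pairwise (· ≤ ·)) (hy : y ∈ xs.dropWhile (fun z => z == x)) : x < y := by
  induction xs with
  | nil => simp at hy
  | cons a as ih =>
    rw [List.dropWhile_cons] at hy
    rcases List.pairwise_cons.mp h with ⟨hle, hpa⟩
    by_cases hax : (a == x) = true
    · rw [if_pos hax] at hy
      refine ih ?_ hy
      refine List.pairwise_cons.mpr ⟨?_, (List.pairwise_cons.mp hpa).2⟩
      exact fun b hb => hle b (List.mem_cons_of_mem _ hb)
    · rw [if_neg hax] at hy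
      have hxa : x < a :=
        lt_of_le_of_ne (hle a (List.mem_cons_self ..)) (fun he => hax (by simp [he]))
      rcases List.mem_cons.mp hy with rfl | hy
      · exact hxa
      · exact lt_of_lt_of_le hxa ((List.pairwise_cons.mp hpa).1 y hy)

lemma pairwise_dropWhile {x : String} {xs : List String}
    (h : (x :: xs).Pairwise (· ≤ ·)) : (xs.dropWhile (fun z => z == x)).Pairwise (· ≤ ·) := by
  exact (List.pairwise_cons.mp h).2.sublist (List.dropWhile_sublist _)

lemma mem_pvKeys {k : String} {vals : List String} (h : vals.Pairwise (· ≤ ·)) :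
    k ∈ pvKeys vals ↔ k ∈ vals := by
  induction vals using pvKeys.induct with
  | case1 => simp [pvKeys]
  | case2 x xs ih =>
    constructor
    · exact mem_of_mem_pvKeys
    · intro hk
      rw [pvKeys]
      rcases List.mem_cons.mp hk with rfl | hk
      · exact List.mem_cons_self ..
      · rw [← List.takeWhile_append_dropWhile (p := fun z => z == x) (l := xs)] at hk
        rcases List.mem_append.mp hk with hk | hk
        · have := List.mem_takeWhile_imp hk
          simp only [beq_iff_eq] at this
          simp [this]
        · exact List.mem_cons_of_mem _ ((ih (pairwise_dropWhile h)).mpr hk)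

lemma pvKeys_pairwise : ∀ {vals : List String}, vals.Pairwise (· ≤ ·) →
    (pvKeys vals).Pairwise (· < ·) := by
  intro vals
  induction vals using pvKeys.induct with
  | case1 => simp [pvKeys]
  | case2 x xs ih =>
    intro h
    rw [pvKeys]
    refine List.pairwise_cons.mpr ⟨?_, ih (pairwise_dropWhile h)⟩
    exact fun y hy => lt_of_mem_dropWhile h (mem_of_mem_pvKeys hy)

lemma pvRuns_eq_map : ∀ {vals : List String}, vals.Pairwise (· ≤ ·) →
    pvRuns vals = (pvKeys vals).map (fun k => (k, (vals.count k : Int))) := by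
  intro vals
  induction vals using pvRuns.induct with
  | case1 => simp [pvRuns, pvKeys]
  | case2 x xs ih =>
    intro h
    have hdr := pairwise_dropWhile h
    have htk_count : (xs.takeWhile (fun y => y == x)).count x
        = (xs.takeWhile (fun y => y == x)).length := by
      refine List.count_eq_length.mpr fun b hb => ?_
      have := List.mem_takeWhile_imp hb
      simp only [beq_iff_eq] at this
      exact this.symm
    have hdr_count : (xs.dropWhile (fun y => y == x)).count x = 0 :=
      List.count_eq_zero.mpr fun hx => lt_irrefl x (lt_of_mem_dropWhile h hx)
    rw [pvRuns, pvKeys, List.map_cons, ih hdr]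
    congr 1
    · have : (x :: xs).count x = (xs.takeWhile (fun y => y == x)).length + 1 := by
        rw [List.count_cons_self,
          ← List.takeWhile_append_dropWhile (p := fun z => z == x) (l := xs),
          List.count_append, htk_count]
        simp [hdr_count]
      simp [this]
    · refine List.map_congr_left fun k hk => ?_
      have hkdr := mem_of_mem_pvKeys hk
      have hxk : x < k := lt_of_mem_dropWhile h hkdr
      have h1 : (x :: xs).count k = xs.count k :=
        List.count_cons_of_ne (ne_of_lt hxk)
      have h2 : (xs.takeWhile (fun y => y == x)).count k = 0 := by
        refine List.count_eq_zero.mpr fun hkt => ?_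
        have := List.mem_takeWhile_imp hkt
        simp only [beq_iff_eq] at this
        exact lt_irrefl x (this ▸ hxk)
      rw [h1, ← List.takeWhile_append_dropWhile (p := fun z => z == x) (l := xs),
        List.count_append, h2]
      simp

lemma max?_int_eq_of_mem_iff (xs ys : List Int) (h : ∀ v, v ∈ xs ↔ v ∈ ys) :
    PySem.List.max? xs (fun v => v) = PySem.List.max? ys (fun v => v) := by
  cases hx : PySem.List.max? xs (fun v => v) with
  | none =>
    rw [PySem.List.max?_eq_none_iff] at hx
    subst hx
    symm
    rw [PySem.List.max?_eq_none_iff]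
    refine List.eq_nil_iff_forall_not_mem.mpr fun v hv => ?_
    simpa using (h v).mpr hv
  | some a =>
    have ha := PySem.List.max?_mem hx
    have hamax := PySem.List.max?_isMax hx
    cases hy : PySem.List.max? ys (fun v => v) with
    | none =>
      rw [PySem.List.max?_eq_none_iff] at hy
      subst hy
      simpa using (h a).mp ha
    | some b =>
      have hb := PySem.List.max?_mem hy
      have hbmax := PySem.List.max?_isMax hy
      have h1 : a ≤ b := hbmax a ((h a).mp ha)
      have h2 : b ≤ a := hamax b ((h b).mpr hb)
      rw [le_antisymm h1 h2]

-- ===== VERDICT (by name: the statement is the Claim_ definition above) =====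
theorem pick_tipo_dato_spec : Claim_equal_pick_tipo_dato := by
  intro tipos _
  simp only [Spec_pick_tipo_dato, pick_tipo_dato, pick_tipo_dato_alt]
  by_cases hS : tipos.filter (fun t => t != "") = []
  · simp [hS, PySem.List.sorted_eq_nil_iff]
  · have hT : PySem.List.sorted (tipos.filter (fun t => t != "")) (fun t => t) ≠ [] := by
      simpa [PySem.List.sorted_eq_nil_iff] using hS
    rw [if_neg hS, if_neg hT]
    set S := tipos.filter (fun t => t != "") with hSdef
    set T := PySem.List.sorted S (fun t => t) with hTdef
    have hperm : T.Perm S := PySem.List.sorted_perm S (fun t => t) false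
    have hpw : T.Pairwise (· ≤ ·) := by
      simpa using PySem.List.sorted_pairwise S (fun t => t)
    rw [pvRuns_eq_map hpw]
    have hvals : (PySem.Dict.counter S).values
        = (PySem.Set.ofList S).map (fun k => ((S.count k : Int))) := by
      simp only [PySem.Dict.values, PySem.Dict.items_counter, List.map_map, Function.comp_def]
    have hmax : PySem.List.max? (PySem.Dict.counter S).values (fun v => v)
        = PySem.List.max? (((pvKeys T).map (fun k => (k, (T.count k : Int)))).map
            (fun p => p.2)) (fun v => v) := by
      rw [hvals]
      apply max?_int_eq_of_mem_iff
      intro v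
      simp [List.mem_map, PySem.Set.mem_ofList, mem_pvKeys hpw, hperm.count_eq, hperm.mem_iff]
    rw [← hmax]
    set m := (PySem.List.max? (PySem.Dict.counter S).values (fun v => v)).getD 0 with hm
    have hc : PySem.List.sorted (((PySem.Dict.counter S).items.filter
          (fun p => p.2 == m)).map (fun p => p.1)) (fun t => t)
        = (((pvKeys T).map (fun k => (k, (T.count k : Int)))).filter
          (fun p => p.2 == m)).map (fun p => p.1) := by
      apply PySem.List.sorted_eq_of_perm_of_pairwise_lt
      · rw [PySem.Dict.items_counter, List.filter_map, List.filter_map,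
          List.map_map, List.map_map]
        simp only [Function.comp_def, List.map_id']
        refine (List.perm_ext_iff_of_nodup ?_ ?_).mpr ?_
        · exact (((pvKeys_pairwise hpw).imp ne_of_lt).filter _)
        · exact ((PySem.Set.nodup_ofList S).filter _)
        · intro a
          simp [List.mem_filter, mem_pvKeys hpw, PySem.Set.mem_ofList,
            hperm.count_eq, hperm.mem_iff]
      · rw [List.filter_map, List.map_map]
        simp only [Function.comp_def, List.map_id']
        exact ((pvKeys_pairwise hpw).filter _)
    rw [hc]
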